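-- pv_equiv track=rewrite | github.com/BashCtl/python-edabit | very_hard/single_letter_swaps.py | validate_swaps
-- ===== SOURCE A (Python) =====
-- def validate_swaps(lst, txt):
--     result = []
--     count = 0
--     for word in lst:
--         if len(word) == len(txt):
--             for i in range(len(txt)):
--                 if word[i] != txt[i]:
--                     count += 1
--                 if word.count(word[i]) != txt.count(word[i]):
--                     count += 1
--             result.append(count <= 2)
--             count = 0
--         else:
--             result.append(False)
--     return result
-- ===== SOURCE B (Python) =====
-- def validate_swaps(lst, txt):
--     ct = {}
--     for ch in txt:
--         ct[ch] = ct.get(ch, 0) + 1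
--
--     def ok(word):
--         if len(word) != len(txt):
--             return False
--         cw = {}
--         for ch in word:
--             cw[ch] = cw.get(ch, 0) + 1
--         mismatch = sum(1 for a, b in zip(word, txt) if a != b)
--         extra = sum(cnt for ch, cnt in cw.items() if cnt != ct.get(ch, 0))
--         return mismatch + extra <= 2
--
--     return [ok(w) for w in lst]
-- ===== Notes on version B (the rewrite author's own statement) =====
-- stated objective: alternative
-- what changed: A rescans both strings with word.count/txt.count at every position; B builds one character-count dict per string and sums the mismatched-count multiplicities in a single aggregate pass over the distinct characters, plus one zip pass for positional mismatches.
import Mathlib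
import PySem

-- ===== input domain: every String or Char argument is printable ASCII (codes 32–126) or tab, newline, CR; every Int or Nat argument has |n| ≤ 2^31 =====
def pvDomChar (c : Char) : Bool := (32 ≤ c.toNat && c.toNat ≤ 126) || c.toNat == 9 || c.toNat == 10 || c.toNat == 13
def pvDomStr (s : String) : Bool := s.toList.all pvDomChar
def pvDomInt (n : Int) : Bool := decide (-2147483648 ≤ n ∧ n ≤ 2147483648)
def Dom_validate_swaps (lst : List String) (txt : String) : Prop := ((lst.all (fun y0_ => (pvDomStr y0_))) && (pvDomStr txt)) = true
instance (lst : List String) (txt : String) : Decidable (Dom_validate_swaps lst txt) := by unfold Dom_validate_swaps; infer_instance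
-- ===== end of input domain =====

-- B replaces A's per-position frequency comparison (word.count/txt.count inside the index loop)
-- by character-count dictionaries built once per string plus one aggregate pass over the
-- distinct characters; objective: alternative (a different counting strategy of similar cost).

-- ===== PORT A =====
-- inner 'for i in range(len(txt))' loop of A, accumulating count
def aInner (w t : List Char) (c0 : Int) : Int :=
  (PySem.List.pyRange 0 (PySem.List.len t)).foldl
    (fun c i =>
      let c := if PySem.List.pyGetD w i ' ' ≠ PySem.List.pyGetD t i ' ' then c + 1 else c
      if PySem.Chars.count w [PySem.List.pyGetD w i ' '] ≠ PySem.Chars.count t [PySem.List.pyGetD w i ' ']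
        then c + 1 else c)
    c0

-- one iteration of A's outer loop; state = (result, count)
def aStep (t : List Char) (st : List Bool × Int) (word : String) : List Bool × Int :=
  let w := word.toList
  if w.length = t.length then
    (st.1 ++ [decide (aInner w t st.2 ≤ 2)], 0)
  else
    (st.1 ++ [false], st.2)

def validate_swaps (lst : List String) (txt : String) : List Bool :=
  (lst.foldl (aStep txt.toList) ([], 0)).1

-- ===== PORT B =====
-- 'c = {}; for ch in s: c[ch] = c.get(ch, 0) + 1'
def altCounter (cs : List Char) : PySem.Dict Char Int :=
  cs.foldl (fun d ch => d.insert ch (d.getD ch 0 + 1)) PySem.Dict.empty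

-- B's per-word test 'ok'
def altOk (ct : PySem.Dict Char Int) (t : List Char) (word : String) : Bool :=
  let w := word.toList
  if w.length ≠ t.length then false
  else
    let cw := altCounter w
    let mismatch : Int := ((w.zip t).map (fun p => if p.1 ≠ p.2 then (1 : Int) else 0)).sum
    let extra : Int := (cw.items.map (fun p => if p.2 ≠ ct.getD p.1 0 then p.2 else 0)).sum
    decide (mismatch + extra ≤ 2)

def validate_swaps_alt (lst : List String) (txt : String) : List Bool :=
  let t := txt.toList
  let ct := altCounter t
  lst.map (altOk ct t)

-- ===== PRECONDITION & SPEC =====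
def Spec_validate_swaps (lst : List String) (txt : String) (out : List Bool) : Prop := out = validate_swaps_alt lst txt
instance (lst : List String) (txt : String) (out : List Bool) : Decidable (Spec_validate_swaps lst txt out) := by unfold Spec_validate_swaps; infer_instance

-- ===== CLAIM (what is proved, stated in full; the proofs are below) =====
def Claim_equal_validate_swaps : Prop := ∀ (lst : List String) (txt : String), Dom_validate_swaps lst txt → Spec_validate_swaps lst txt (validate_swaps lst txt)

-- ===== LEMMAS AND PROOFS =====

-- Python's s.count(c) for a single character c is the character count
theorem chars_count_go_single (c : Char) : ∀ (fuel : Nat) (l : List Char) (acc : Nat), l.length ≤ fuel →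
    PySem.Chars.count.go [c] fuel l acc = acc + l.count c := by
  intro fuel
  induction fuel with
  | zero => intro l acc h; cases l with
    | nil => simp [PySem.Chars.count.go]
    | cons x t => simp at h
  | succ n ih => intro l acc h; cases l with
    | nil => simp [PySem.Chars.count.go]
    | cons x t =>
      rw [PySem.Chars.count.go]
      by_cases hx : x = c
      · subst hx
        simp [List.isPrefixOf, ih t (acc + 1) (by simpa using h)]
        omega
      · simp [List.isPrefixOf, hx, ih t acc (by simpa using h), Ne.symm hx]

theorem chars_count_single (cs : List Char) (c : Char) :
    PySem.Chars.count cs [c] = cs.count c := by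
  simp [PySem.Chars.count, chars_count_go_single c cs.length cs 0 le_rfl]

-- summing 'g x if p x else 0' is summing g over the filtered list
theorem sum_map_ite_filter {α : Type} (p : α → Bool) (g : α → Int) (l : List α) :
    (l.map (fun x => if p x then g x else 0)).sum = ((l.filter p).map g).sum := by
  induction l with
  | nil => simp
  | cons a l ih =>
    cases hp : p a <;> simp [hp, ih]

theorem ofList_perm_dedup (l : List Char) :
    (PySem.Set.ofList l).Perm l.dedup := by
  rw [List.perm_ext_iff_of_nodup (PySem.Set.nodup_ofList l) l.nodup_dedup]
  intro a
  simp [PySem.Set.mem_ofList]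

-- grouping by distinct characters: Σ_{k distinct in l, p k} l.count k  =  Σ_{c in l} [p c]
theorem sum_ofList_count_ite (p : Char → Bool) (l : List Char) :
    ((PySem.Set.ofList l).map (fun k => if p k then (l.count k : Int) else 0)).sum
      = (l.map (fun c => if p c then (1 : Int) else 0)).sum := by
  rw [(((ofList_perm_dedup l).map _).sum_eq :
        ((PySem.Set.ofList l).map (fun k => if p k then (l.count k : Int) else 0)).sum = _)]
  rw [sum_map_ite_filter p (fun k => (l.count k : Int)),
      PySem.List.sum_map_ite_one_zero p l]
  have : ((l.dedup.filter p).map fun k => (l.count k : Int)).sum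
      = (((l.dedup.filter p).map fun k => l.count k).map (Nat.cast : Nat → Int)).sum := by
    simp [List.map_map, Function.comp_def]
  rw [this, ← Nat.cast_list_sum, List.sum_map_count_dedup_filter_eq_countP p l]

-- A's inner loop computes B's mismatch + extra (when the lengths agree)
theorem aInner_eq (w t : List Char) (hlen : w.length = t.length) :
    aInner w t 0
      = ((w.zip t).map (fun p => if p.1 ≠ p.2 then (1 : Int) else 0)).sum
        + (((PySem.Dict.counter w).items).map
            (fun p => if p.2 ≠ (PySem.Dict.counter t).getD p.1 0 then p.2 else 0)).sum := by
  unfold aInner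
  rw [PySem.List.foldl_congr_mem _ _
      (fun c i => c + ((if PySem.List.pyGetD w i ' ' ≠ PySem.List.pyGetD t i ' ' then (1 : Int) else 0)
        + (if PySem.Chars.count w [PySem.List.pyGetD w i ' '] ≠ PySem.Chars.count t [PySem.List.pyGetD w i ' '] then (1 : Int) else 0))) 0
      (by intro acc x _; dsimp only; split_ifs <;> ring)]
  rw [PySem.List.foldl_add, PySem.List.sum_map_add_int, zero_add]
  congr 1
  · -- mismatch part
    congr 1
    have hl : PySem.List.len t = ((t.length : Int)) := by simp
    rw [hl, PySem.List.pyRange_zero_natCast, List.map_map]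
    apply List.ext_getElem
    · simp [hlen, List.length_zip]
    · intro k hk1 hk2
      simp only [List.length_map, List.length_range] at hk1
      simp [List.getElem_zip, hlen ▸ hk1, hk1]
  · -- frequency part
    have hl : PySem.List.len t = PySem.List.len w := by simp [hlen]
    rw [hl]
    have hmap : (PySem.List.pyRange 0 (PySem.List.len w)).map
          (fun i => if PySem.Chars.count w [PySem.List.pyGetD w i ' '] ≠ PySem.Chars.count t [PySem.List.pyGetD w i ' '] then (1 : Int) else 0)
        = (((PySem.List.pyRange 0 (PySem.List.len w)).map (fun j => PySem.List.pyGetD w j ' ')).map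
            (fun c => if PySem.Chars.count w [c] ≠ PySem.Chars.count t [c] then (1 : Int) else 0)) := by
      rw [List.map_map]; rfl
    rw [hmap, PySem.List.map_pyGetD_pyRange_zero w ' ']
    rw [PySem.Dict.items_counter w, List.map_map]
    have : ((fun p : Char × Int => if p.2 ≠ (PySem.Dict.counter t).getD p.1 0 then p.2 else 0)
            ∘ fun k => (k, (w.count k : Int)))
        = fun k => if ((w.count k : Int) ≠ (t.count k : Int)) then (w.count k : Int) else 0 := by
      funext k
      simp [PySem.Dict.getD_counter]
    rw [this]
    have hp : ∀ (f : Char → Int),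
        (PySem.Set.ofList w).map (fun k => if ((w.count k : Int) ≠ (t.count k : Int)) then (w.count k : Int) else 0)
        = (PySem.Set.ofList w).map (fun k => if (fun c => !((w.count c : Int) == (t.count c : Int))) k then (w.count k : Int) else 0) := by
      intro _; apply List.map_congr_left; intro k _
      by_cases h : w.count k = t.count k <;> simp [h]
    rw [hp (fun _ => 0), sum_ofList_count_ite (fun c => !((w.count c : Int) == (t.count c : Int))) w]
    apply congrArg
    apply List.map_congr_left; intro c _
    by_cases h : w.count c = t.count c <;> simp [h, chars_count_single]

-- the outer fold builds the map of the per-word test, the count re-entering each word as 0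
theorem foldA (t : List Char) (ct : PySem.Dict Char Int) (hct : ct = altCounter t) :
    ∀ (lst : List String) (acc : List Bool),
      (lst.foldl (aStep t) (acc, 0)).1 = acc ++ lst.map (altOk ct t) := by
  intro lst
  induction lst with
  | nil => intro acc; simp
  | cons word rest ih =>
    intro acc
    have hstep : aStep t (acc, 0) word = (acc ++ [altOk ct t word], 0) := by
      unfold aStep altOk
      by_cases h : word.toList.length = t.length
      · rw [if_pos h, aInner_eq word.toList t h]
        simp [h, hct, altCounter, PySem.Dict.foldl_insert_getD_add_one_eq_counter]
      · rw [if_neg h]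
        have h' : ¬ word.length = t.length := by simpa using h
        simp [h']
    simp only [List.foldl_cons, hstep, ih, List.map_cons]
    simp

-- ===== VERDICT (by name: the statement is the Claim_ definition above) =====
theorem validate_swaps_spec : Claim_equal_validate_swaps := by
  intro lst txt _
  unfold Spec_validate_swaps validate_swaps validate_swaps_alt
  rw [foldA txt.toList (altCounter txt.toList) rfl lst []]
  simp
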